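-- pv_equiv track=rewrite | github.com/OCTPSY/octps | urmother/sweep/swiip.py | highest_score_from_dict_v0
-- ===== SOURCE A (Python) =====
-- def highest_score_from_dict_v0( match_result_dict ):
--     """
--     Find the highest score from the match_result_dict.
--     """
--     highest_score = 0
--     for idx, match_result in enumerate( match_result_dict ):
--         if match_result_dict[ match_result ] >= highest_score:
--             highest_score = match_result_dict[ match_result ]
--             final_result = { match_result : highest_score }
--
--     if highest_score == 0:
--         return { "fail_to_match": highest_score }
--     else:
--         return final_result
-- ===== SOURCE B (Python) =====
-- def highest_score_from_dict_v0(match_result_dict):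
--     max_val = max(match_result_dict.values(), default=0)
--     if max_val <= 0:
--         return {"fail_to_match": 0}
--     best_key = None
--     for key, value in match_result_dict.items():
--         if value == max_val:
--             best_key = key
--     return {best_key: max_val}
-- ===== Notes on version B (the rewrite author's own statement) =====
-- stated objective: alternative
-- what changed: Replaces A's single running-max scan (carrying a mutable best-entry dict and re-indexing the dict per key) with a two-pass compute-extremum-then-locate structure: first max(values, default=0), then, if positive, a second pass keeping the last key whose value equals that maximum.
import Mathlib
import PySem

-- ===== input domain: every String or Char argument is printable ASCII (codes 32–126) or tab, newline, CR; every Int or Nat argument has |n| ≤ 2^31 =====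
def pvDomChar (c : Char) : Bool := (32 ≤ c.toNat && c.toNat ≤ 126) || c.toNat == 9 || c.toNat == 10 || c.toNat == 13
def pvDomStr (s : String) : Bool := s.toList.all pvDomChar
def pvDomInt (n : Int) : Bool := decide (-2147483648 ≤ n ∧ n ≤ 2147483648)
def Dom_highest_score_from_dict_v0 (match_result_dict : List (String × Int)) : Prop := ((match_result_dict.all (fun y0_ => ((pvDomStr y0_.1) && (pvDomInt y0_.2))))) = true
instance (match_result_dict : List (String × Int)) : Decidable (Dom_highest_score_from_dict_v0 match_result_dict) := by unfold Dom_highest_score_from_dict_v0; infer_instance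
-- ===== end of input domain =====

-- B replaces A's single running-max scan with a two-pass compute-the-maximum-then-locate-its-last-key
-- structure (objective: alternative decomposition, same O(n) cost).

-- ===== PORT A =====
-- Literal port of A: running max (seeded with 0), updating the one-entry result dict on every
-- value ≥ running max (dict indexing match_result_dict[key] is Dict.get?; the `none` branch of the
-- final match corresponds to Python's unreachable UnboundLocalError when highest_score ≠ 0).
def highest_score_from_dict_v0 (match_result_dict : List (String × Int)) : List (String × Int) :=
  let st :=
    (PySem.Dict.mk match_result_dict).keys.foldl
      (fun (st : Int × Option (String × Int)) k =>
        let v := ((PySem.Dict.mk match_result_dict).get? k).getD 0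
        if v ≥ st.1 then (v, some (k, v)) else st)
      (0, none)
  if st.1 = 0 then [("fail_to_match", 0)]
  else match st.2 with
    | some p => [p]
    | none => []

-- ===== PORT B =====
-- Literal port of Source B: max(values, default=0); fail if ≤ 0; else second pass keeping the last
-- key whose value equals the maximum.
def highest_score_from_dict_v0_alt (match_result_dict : List (String × Int)) : List (String × Int) :=
  let max_val :=
    match (PySem.Dict.mk match_result_dict).values with
    | [] => 0
    | v :: vs => vs.foldl max v
  if max_val ≤ 0 then [("fail_to_match", 0)]
  else
    let best_key := match_result_dict.foldl
      (fun (acc : Option String) kv => if kv.2 = max_val then some kv.1 else acc) none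
    match best_key with
    | some k => [(k, max_val)]
    | none => []

-- ===== PRECONDITION & SPEC =====
-- Pre_ excludes association lists with duplicate keys: those do not represent any Python dict
-- (the argument is a dict, whose keys are unique by construction), so A accepts no such input.
def Pre_highest_score_from_dict_v0 (match_result_dict : List (String × Int)) : Prop :=
  (match_result_dict.map Prod.fst).Nodup

instance (match_result_dict : List (String × Int)) : Decidable (Pre_highest_score_from_dict_v0 match_result_dict) := by unfold Pre_highest_score_from_dict_v0; infer_instance

def pvWitness_highest_score_from_dict_v0 : (List (String × Int)) := [("a", 1), ("b", -2)]

def Spec_highest_score_from_dict_v0 (match_result_dict : List (String × Int)) (out : List (String × Int)) : Prop := out = highest_score_from_dict_v0_alt match_result_dict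
instance (match_result_dict : List (String × Int)) (out : List (String × Int)) : Decidable (Spec_highest_score_from_dict_v0 match_result_dict out) := by unfold Spec_highest_score_from_dict_v0; infer_instance

-- ===== CLAIM (what is proved, stated in full; the proofs are below) =====
def Claim_equal_highest_score_from_dict_v0 : Prop := ∀ (match_result_dict : List (String × Int)), Dom_highest_score_from_dict_v0 match_result_dict → Pre_highest_score_from_dict_v0 match_result_dict → Spec_highest_score_from_dict_v0 match_result_dict (highest_score_from_dict_v0 match_result_dict)

-- ===== LEMMAS AND PROOFS =====

-- A's loop over pairs (after the dict lookup is resolved).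
def aF (l : List (String × Int)) (st : Int × Option (String × Int)) : Int × Option (String × Int) :=
  l.foldl (fun st kv => if kv.2 ≥ st.1 then (kv.2, some (kv.1, kv.2)) else st) st

-- running maximum
def mxF (l : List (String × Int)) (h : Int) : Int := l.foldl (fun a kv => max a kv.2) h

-- "last pair with value M" / "last key with value M" folds
def pF (M : Int) (l : List (String × Int)) (a : Option (String × Int)) : Option (String × Int) :=
  l.foldl (fun acc kv => if kv.2 = M then some (kv.1, kv.2) else acc) a
def kF (M : Int) (l : List (String × Int)) (a : Option String) : Option String :=
  l.foldl (fun acc kv => if kv.2 = M then some kv.1 else acc) a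

theorem aF_cons (kv : String × Int) (t : List (String × Int)) (st : Int × Option (String × Int)) :
    aF (kv :: t) st = aF t (if kv.2 ≥ st.1 then (kv.2, some (kv.1, kv.2)) else st) := by
  simp only [aF, List.foldl_cons]

theorem mxF_cons (kv : String × Int) (t : List (String × Int)) (h : Int) :
    mxF (kv :: t) h = mxF t (max h kv.2) := rfl

theorem pF_cons (M : Int) (kv : String × Int) (t : List (String × Int)) (a : Option (String × Int)) :
    pF M (kv :: t) a = pF M t (if kv.2 = M then some (kv.1, kv.2) else a) := by
  simp only [pF, List.foldl_cons]

theorem kF_cons (M : Int) (kv : String × Int) (t : List (String × Int)) (a : Option String) :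
    kF M (kv :: t) a = kF M t (if kv.2 = M then some kv.1 else a) := by
  simp only [kF, List.foldl_cons]

theorem aF_fst (l : List (String × Int)) (st : Int × Option (String × Int)) :
    (aF l st).1 = mxF l st.1 := by
  induction l generalizing st with
  | nil => rfl
  | cons kv t ih =>
    rw [aF_cons, mxF_cons]
    by_cases h : kv.2 ≥ st.1
    · rw [if_pos h, ih, max_eq_right h]
    · rw [if_neg h, ih, max_eq_left (le_of_not_ge h)]

theorem le_mxF (l : List (String × Int)) (h : Int) : h ≤ mxF l h := by
  induction l generalizing h with
  | nil => exact le_refl _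
  | cons kv t ih =>
    rw [mxF_cons]
    exact le_trans (le_max_left _ _) (ih (max h kv.2))

theorem mxF_mem (l : List (String × Int)) (h : Int) :
    mxF l h = h ∨ ∃ kv ∈ l, kv.2 = mxF l h := by
  induction l generalizing h with
  | nil => exact Or.inl rfl
  | cons kv t ih =>
    rw [mxF_cons]
    rcases ih (max h kv.2) with heq | ⟨q, hq, hqv⟩
    · by_cases hc : kv.2 ≥ h
      · exact Or.inr ⟨kv, List.mem_cons_self, by rw [heq, max_eq_right hc]⟩
      · exact Or.inl (by rw [heq, max_eq_left (le_of_not_ge hc)])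
    · exact Or.inr ⟨q, List.mem_cons_of_mem _ hq, hqv⟩

theorem mxF_max (l : List (String × Int)) (a b : Int) :
    mxF l (max a b) = max a (mxF l b) := by
  induction l generalizing b with
  | nil => rfl
  | cons kv t ih =>
    rw [mxF_cons, mxF_cons, max_assoc, ih]

theorem pF_id (M : Int) (l : List (String × Int)) (a : Option (String × Int))
    (h : ∀ kv ∈ l, kv.2 ≠ M) : pF M l a = a := by
  induction l generalizing a with
  | nil => rfl
  | cons kv t ih =>
    rw [pF_cons, if_neg (h kv List.mem_cons_self)]
    exact ih _ (fun q hq => h q (List.mem_cons_of_mem _ hq))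

theorem kF_id (M : Int) (l : List (String × Int)) (a : Option String)
    (h : ∀ kv ∈ l, kv.2 ≠ M) : kF M l a = a := by
  induction l generalizing a with
  | nil => rfl
  | cons kv t ih =>
    rw [kF_cons, if_neg (h kv List.mem_cons_self)]
    exact ih _ (fun q hq => h q (List.mem_cons_of_mem _ hq))

-- If some pair has value M, both "last match" folds succeed with the same key, independently of
-- their starting accumulators.
theorem foldl_last (M : Int) (l : List (String × Int)) (hex : ∃ kv ∈ l, kv.2 = M) :
    ∃ k, (∀ a, pF M l a = some (k, M)) ∧ (∀ b, kF M l b = some k) := by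
  induction l with
  | nil => simp at hex
  | cons kv t ih =>
    by_cases ht : ∃ q ∈ t, q.2 = M
    · rcases ih ht with ⟨k, hp, hk⟩
      exact ⟨k, fun a => by rw [pF_cons]; exact hp _, fun b => by rw [kF_cons]; exact hk _⟩
    · have ht : ∀ q ∈ t, q.2 ≠ M := fun q hq he => ht ⟨q, hq, he⟩
      rcases hex with ⟨q, hq, hqv⟩
      rcases List.mem_cons.mp hq with rfl | hqt
      · refine ⟨q.1, fun a => ?_, fun b => ?_⟩
        · rw [pF_cons, if_pos hqv, show (q.1, q.2) = (q.1, M) from by rw [hqv]]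
          exact pF_id M t _ ht
        · rw [kF_cons, if_pos hqv]
          exact kF_id M t _ ht
      · exact absurd hqv (ht q hqt)

-- characterisation of A's second component: the last pair whose value equals the final maximum.
theorem aF_snd (l : List (String × Int)) (st : Int × Option (String × Int)) :
    (aF l st).2 = pF (mxF l st.1) l st.2 := by
  induction l generalizing st with
  | nil => rfl
  | cons kv t ih =>
    rw [aF_cons, mxF_cons, pF_cons]
    by_cases hc : kv.2 ≥ st.1
    · rw [if_pos hc, max_eq_right hc]
      by_cases he : kv.2 = mxF t kv.2
      · rw [if_pos he]
        simpa using ih (kv.2, some (kv.1, kv.2))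
      · rw [if_neg he]
        have hex : ∃ q ∈ t, q.2 = mxF t kv.2 := by
          rcases mxF_mem t kv.2 with h0 | h0
          · exact absurd h0.symm he
          · exact h0
        rcases foldl_last (mxF t kv.2) t hex with ⟨k, hp, _⟩
        have hl : (aF t (kv.2, some (kv.1, kv.2))).2 = pF (mxF t kv.2) t (some (kv.1, kv.2)) := by
          simpa using ih (kv.2, some (kv.1, kv.2))
        rw [hl, hp, hp]
    · rw [if_neg hc, max_eq_left (le_of_not_ge hc)]
      have hne : kv.2 ≠ mxF t st.1 := by
        have h1 : kv.2 < st.1 := lt_of_not_ge hc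
        have h2 : st.1 ≤ mxF t st.1 := le_mxF t st.1
        omega
      rw [if_neg hne]
      exact ih st

-- ===== VERDICT (by name: the statement is the Claim_ definition above) =====
theorem highest_score_from_dict_v0_spec : Claim_equal_highest_score_from_dict_v0 := by
  intro d hdom hpre
  unfold Spec_highest_score_from_dict_v0
  unfold highest_score_from_dict_v0 highest_score_from_dict_v0_alt
  have hkeysnd : ((PySem.Dict.mk d).keys).Nodup := by
    simpa [PySem.Dict.keys] using hpre
  -- resolve the dict lookups: A's fold over the keys is aF over the pairs
  have hA : (PySem.Dict.mk d).keys.foldl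
      (fun (st : Int × Option (String × Int)) k =>
        let v := ((PySem.Dict.mk d).get? k).getD 0
        if v ≥ st.1 then (v, some (k, v)) else st) (0, none) = aF d (0, none) := by
    have hk : (PySem.Dict.mk d).keys = d.map Prod.fst := by simp [PySem.Dict.keys]
    rw [hk, List.foldl_map]
    apply PySem.List.foldl_congr_mem
    intro acc kv hmem
    have hmem' : (kv.1, kv.2) ∈ (PySem.Dict.mk d).items := by simpa using hmem
    have hget : (PySem.Dict.mk d).get? kv.1 = some kv.2 :=
      PySem.Dict.get?_of_mem_items (PySem.Dict.mk d) hmem' hkeysnd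
    simp [hget]
  rw [hA]
  -- both sides, by cases on the list
  cases d with
  | nil => rfl
  | cons kv t =>
    have hvals : (PySem.Dict.mk (kv :: t)).values = kv.2 :: t.map Prod.snd := by
      simp [PySem.Dict.values]
    rw [hvals]
    have hm : (t.map Prod.snd).foldl max kv.2 = mxF t kv.2 := by
      rw [mxF, List.foldl_map]
    have hhs : (aF (kv :: t) (0, none)).1 = max 0 (mxF t kv.2) := by
      rw [aF_fst]
      show mxF (kv :: t) 0 = _
      rw [mxF_cons, show max (0 : Int) kv.2 = max 0 kv.2 from rfl, mxF_max]
    simp only [hm]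
    by_cases hz : (aF (kv :: t) (0, none)).1 = 0
    · rw [if_pos hz]
      have hle : mxF t kv.2 ≤ 0 := by
        rw [hhs] at hz
        omega
      rw [if_pos hle]
    · rw [if_neg hz]
      have hpos : 0 < mxF t kv.2 := by
        by_cases h : mxF t kv.2 ≤ 0
        · exact absurd (by rw [hhs, max_eq_left h]) hz
        · omega
      rw [if_neg (by omega : ¬ mxF t kv.2 ≤ 0)]
      have hsval : (aF (kv :: t) (0, none)).1 = mxF t kv.2 := by
        rw [hhs]; omega
      have hex : ∃ q ∈ kv :: t, q.2 = mxF (kv :: t) (0 : Int) := by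
        rcases mxF_mem (kv :: t) 0 with h0 | h0
        · exfalso
          apply hz
          rw [aF_fst, h0]
        · exact h0
      have hmx : mxF (kv :: t) (0 : Int) = mxF t kv.2 := by
        rw [mxF_cons, show max (0 : Int) kv.2 = max 0 kv.2 from rfl, mxF_max]
        omega
      rw [hmx] at hex
      rcases foldl_last (mxF t kv.2) (kv :: t) hex with ⟨k, hp, hk⟩
      have hsnd : (aF (kv :: t) (0, none)).2 = some (k, mxF t kv.2) := by
        rw [aF_snd]
        show pF (mxF (kv :: t) 0) (kv :: t) none = _
        rw [hmx]
        exact hp none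
      rw [hsnd]
      have hbest : (kv :: t).foldl
          (fun (acc : Option String) q => if q.2 = mxF t kv.2 then some q.1 else acc) none = some k := hk none
      rw [hbest]
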